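-- pv_equiv track=rewrite | github.com/capitan01R/Comfyui-ZiT-Lora-loader | lora_meta.py | parse_lora_key
-- ===== SOURCE A (Python) =====
-- def parse_lora_key(key: str):
--     """
--     Returns (base_key, role) where role is one of:
--       lora_down / lora_up / alpha / dora_scale / bias / other
--     """
--     k = key
--     for suffix in ["lora_down.weight", "lora_up.weight",
--                    "lora_A.weight", "lora_B.weight",
--                    "alpha", "dora_scale", "bias"]:
--         if k.endswith("." + suffix) or k.endswith("_" + suffix):
--             base = k[: -(len(suffix) + 1)]
--             role = suffix.replace(".weight", "").replace("lora_A", "lora_down").replace("lora_B", "lora_up")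
--             return base, role
--     return k, "other"
-- ===== SOURCE B (Python) =====
-- _ROLE_BY_TAIL = {
--     ".lora_down.weight": "lora_down", "_lora_down.weight": "lora_down",
--     ".lora_up.weight": "lora_up", "_lora_up.weight": "lora_up",
--     ".lora_A.weight": "lora_down", "_lora_A.weight": "lora_down",
--     ".lora_B.weight": "lora_up", "_lora_B.weight": "lora_up",
--     ".alpha": "alpha", "_alpha": "alpha",
--     ".dora_scale": "dora_scale", "_dora_scale": "dora_scale",
--     ".bias": "bias", "_bias": "bias",
-- }
--
-- _TAIL_LENGTHS = (17, 15, 14, 6, 11, 5)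
--
-- def parse_lora_key(key: str):
--     for n in _TAIL_LENGTHS:
--         if len(key) >= n:
--             role = _ROLE_BY_TAIL.get(key[-n:])
--             if role is not None:
--                 return key[:-n], role
--     return key, "other"
-- ===== Notes on version B (the rewrite author's own statement) =====
-- stated objective: alternative
-- what changed: Replaces the scan over 7 suffixes (each tested twice with endswith after prepending '.'/'_', role derived by a replace chain) with a precomputed dict from the 14 separator-prefixed tails to their roles, consulted by slicing the key's tail once per distinct tail length.
import Mathlib
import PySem

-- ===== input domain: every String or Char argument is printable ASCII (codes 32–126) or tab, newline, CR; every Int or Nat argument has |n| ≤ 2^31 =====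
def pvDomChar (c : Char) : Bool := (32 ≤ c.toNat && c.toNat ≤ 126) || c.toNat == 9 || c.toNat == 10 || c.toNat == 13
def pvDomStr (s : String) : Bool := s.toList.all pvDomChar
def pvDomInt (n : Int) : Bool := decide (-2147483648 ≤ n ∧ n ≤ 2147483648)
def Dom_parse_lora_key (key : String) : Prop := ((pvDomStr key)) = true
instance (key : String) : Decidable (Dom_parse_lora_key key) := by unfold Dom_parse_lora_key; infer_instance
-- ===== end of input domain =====

-- B replaces A's endswith scan over 7 suffixes by one dict of the 14 separator-prefixed
-- tails, looked up on a tail slice per distinct tail length (alternative decomposition).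

-- ===== PORT A =====
def pvA_role (suffix : String) : String :=
  PySem.Str.replace (PySem.Str.replace (PySem.Str.replace suffix ".weight" "") "lora_A" "lora_down") "lora_B" "lora_up"

def pvA_go (k : String) : List String → String × String
  | [] => (k, "other")
  | suffix :: rest =>
    if PySem.Str.endswith k ("." ++ suffix) || PySem.Str.endswith k ("_" ++ suffix) then
      (PySem.Str.slice k none (some (-(PySem.Str.len suffix + 1))), pvA_role suffix)
    else pvA_go k rest

def parse_lora_key (key : String) : String × String :=
  pvA_go key ["lora_down.weight", "lora_up.weight", "lora_A.weight", "lora_B.weight",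
              "alpha", "dora_scale", "bias"]

-- ===== PORT B =====
def pvB_pairs : List (String × String) :=
  [(".lora_down.weight", "lora_down"), ("_lora_down.weight", "lora_down"),
   (".lora_up.weight", "lora_up"), ("_lora_up.weight", "lora_up"),
   (".lora_A.weight", "lora_down"), ("_lora_A.weight", "lora_down"),
   (".lora_B.weight", "lora_up"), ("_lora_B.weight", "lora_up"),
   (".alpha", "alpha"), ("_alpha", "alpha"),
   (".dora_scale", "dora_scale"), ("_dora_scale", "dora_scale"),
   (".bias", "bias"), ("_bias", "bias")]

def pvB_roleByTail : PySem.Dict String String := PySem.Dict.mk pvB_pairs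

def pvB_go (key : String) : List Int → String × String
  | [] => (key, "other")
  | n :: rest =>
    if PySem.Str.len key ≥ n then
      match PySem.Dict.get? pvB_roleByTail (PySem.Str.slice key (some (-n)) none) with
      | some role => (PySem.Str.slice key none (some (-n)), role)
      | none => pvB_go key rest
    else pvB_go key rest

def parse_lora_key_alt (key : String) : String × String :=
  pvB_go key [17, 15, 14, 6, 11, 5]

-- ===== PRECONDITION & SPEC =====
def Spec_parse_lora_key (key : String) (out : String × String) : Prop := out = parse_lora_key_alt key
instance (key : String) (out : String × String) : Decidable (Spec_parse_lora_key key out) := by unfold Spec_parse_lora_key; infer_instance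

-- ===== CLAIM (what is proved, stated in full; the proofs are below) =====
def Claim_equal_parse_lora_key : Prop := ∀ (key : String), Dom_parse_lora_key key → Spec_parse_lora_key key (parse_lora_key key)

-- ===== LEMMAS AND PROOFS =====

theorem pv_str_ext {s t : String} : s = t ↔ s.toList = t.toList :=
  ⟨fun h => h ▸ rfl, String.toList_injective⟩

theorem pv_len_eq (s : String) : PySem.Str.len s = (s.toList.length : Int) := by
  simp [PySem.Str.len_eq]

theorem pv_drop_tail_iff (l t : List Char) : l.drop (l.length - t.length) = t ↔ t <:+ l := by
  constructor
  · intro h; exact h ▸ List.drop_suffix _ _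
  · rintro ⟨pre, rfl⟩
    have h : (pre ++ t).length - t.length = pre.length := by simp
    rw [h, List.drop_left]

theorem pv_slice_from_toList (key : String) (n : Int) (hn : 0 < n) :
    (PySem.Str.slice key (some (-n)) none).toList
      = key.toList.drop (key.toList.length - n.toNat) := by
  have h1 : -n = -((n.toNat : Int)) := by omega
  rw [h1, PySem.Str.toList_slice, PySem.Chars.slice_eq_listSlice,
      PySem.List.slice_from_neg_natCast _ n.toNat (by omega)]

theorem pv_slice_eq_of_suffix (key t : String) (n : Int) (h0 : 0 < n)
    (hlen : (t.toList.length : Int) = n) (h : t.toList <:+ key.toList) :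
    PySem.Str.slice key (some (-n)) none = t := by
  rw [pv_str_ext, pv_slice_from_toList key n h0]
  have h2 : n.toNat = t.toList.length := by omega
  rw [h2, pv_drop_tail_iff]
  exact h

theorem pv_slice_ne_of_not_suffix (key t : String) (n : Int) (h0 : 0 < n)
    (_hlen : (t.toList.length : Int) = n) (h : ¬ t.toList <:+ key.toList) :
    t ≠ PySem.Str.slice key (some (-n)) none := by
  intro e
  apply h
  have h1 := pv_slice_from_toList key n h0
  rw [← e] at h1
  rw [h1]
  exact List.drop_suffix _ _

theorem pv_slice_ne_of_length (key t : String) (n : Int) (h0 : 0 < n)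
    (hl : PySem.Str.len key ≥ n) (hlen : (t.toList.length : Int) ≠ n) :
    t ≠ PySem.Str.slice key (some (-n)) none := by
  intro e
  apply hlen
  rw [pv_len_eq] at hl
  have h1 := pv_slice_from_toList key n h0
  rw [← e] at h1
  have h2 : t.toList.length = key.toList.length - (key.toList.length - n.toNat) := by
    rw [h1]; simp
  omega

theorem pv_get?_mk_eq_none (L : List (String × String)) (s : String)
    (h : ∀ p ∈ L, p.1 ≠ s) : (PySem.Dict.mk L).get? s = none := by
  induction L with
  | nil => rfl
  | cons p rest ih =>
    obtain ⟨k, v⟩ := p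
    rw [PySem.Dict.get?_mk_cons]
    rw [if_neg]
    · exact ih fun q hq => h q (List.mem_cons_of_mem _ hq)
    · simp only [beq_iff_eq]
      exact h (k, v) (List.mem_cons_self ..)

theorem pvA_skip (k suffix : String) (rest : List String)
    (h1 : ¬ ("." ++ suffix).toList <:+ k.toList)
    (h2 : ¬ ("_" ++ suffix).toList <:+ k.toList) :
    pvA_go k (suffix :: rest) = pvA_go k rest := by
  simp only [pvA_go]
  rw [if_neg]
  simp only [Bool.or_eq_true, PySem.Str.endswith_eq, PySem.Chars.endswith_iff]
  rintro (h | h)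
  · exact h1 h
  · exact h2 h

theorem pvA_hit (k suffix : String) (rest : List String)
    (h : ("." ++ suffix).toList <:+ k.toList ∨ ("_" ++ suffix).toList <:+ k.toList) :
    pvA_go k (suffix :: rest)
      = (PySem.Str.slice k none (some (-(PySem.Str.len suffix + 1))), pvA_role suffix) := by
  simp only [pvA_go]
  rw [if_pos]
  simp only [Bool.or_eq_true, PySem.Str.endswith_eq, PySem.Chars.endswith_iff]
  exact h

theorem pvB_skip (key : String) (n : Int) (rest : List Int)
    (h : PySem.Str.len key ≥ n →
         PySem.Dict.get? pvB_roleByTail (PySem.Str.slice key (some (-n)) none) = none) :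
    pvB_go key (n :: rest) = pvB_go key rest := by
  simp only [pvB_go]
  split_ifs with hl
  · rw [h hl]
  · rfl

theorem pvB_hit (key : String) (n : Int) (rest : List Int) (t r : String)
    (h0 : 0 < n) (hlen : (t.toList.length : Int) = n)
    (hsuf : t.toList <:+ key.toList)
    (hget : PySem.Dict.get? pvB_roleByTail t = some r) :
    pvB_go key (n :: rest) = (PySem.Str.slice key none (some (-n)), r) := by
  have hs := pv_slice_eq_of_suffix key t n h0 hlen hsuf
  have hl : PySem.Str.len key ≥ n := by
    rw [pv_len_eq]
    have h1 := hsuf.length_le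
    omega
  simp only [pvB_go, if_pos hl, hs, hget]

theorem pvB_skip_of_not_suffix (key td tu : String) (n : Int) (rest : List Int)
    (h0 : 0 < n) (hld : (td.toList.length : Int) = n) (hlu : (tu.toList.length : Int) = n)
    (h1 : ¬ td.toList <:+ key.toList) (h2 : ¬ tu.toList <:+ key.toList)
    (honly : ∀ p ∈ pvB_pairs, (p.1.toList.length : Int) = n → p.1 = td ∨ p.1 = tu) :
    pvB_go key (n :: rest) = pvB_go key rest := by
  apply pvB_skip
  intro hl
  apply pv_get?_mk_eq_none
  intro p hp
  by_cases hpl : (p.1.toList.length : Int) = n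
  · rcases honly p hp hpl with h | h
    · rw [h]; exact pv_slice_ne_of_not_suffix key td n h0 hld h1
    · rw [h]; exact pv_slice_ne_of_not_suffix key tu n h0 hlu h2
  · exact pv_slice_ne_of_length key p.1 n h0 hl hpl

theorem pvB_skip_of_not_suffix4 (key tdA tuA tdB tuB : String) (n : Int) (rest : List Int)
    (h0 : 0 < n)
    (hldA : (tdA.toList.length : Int) = n) (hluA : (tuA.toList.length : Int) = n)
    (hldB : (tdB.toList.length : Int) = n) (hluB : (tuB.toList.length : Int) = n)
    (h1 : ¬ tdA.toList <:+ key.toList) (h2 : ¬ tuA.toList <:+ key.toList)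
    (h3 : ¬ tdB.toList <:+ key.toList) (h4 : ¬ tuB.toList <:+ key.toList)
    (honly : ∀ p ∈ pvB_pairs, (p.1.toList.length : Int) = n →
             p.1 = tdA ∨ p.1 = tuA ∨ p.1 = tdB ∨ p.1 = tuB) :
    pvB_go key (n :: rest) = pvB_go key rest := by
  apply pvB_skip
  intro hl
  apply pv_get?_mk_eq_none
  intro p hp
  by_cases hpl : (p.1.toList.length : Int) = n
  · rcases honly p hp hpl with h | h | h | h
    · rw [h]; exact pv_slice_ne_of_not_suffix key tdA n h0 hldA h1
    · rw [h]; exact pv_slice_ne_of_not_suffix key tuA n h0 hluA h2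
    · rw [h]; exact pv_slice_ne_of_not_suffix key tdB n h0 hldB h3
    · rw [h]; exact pv_slice_ne_of_not_suffix key tuB n h0 hluB h4
  · exact pv_slice_ne_of_length key p.1 n h0 hl hpl

theorem pv_step (key suffix td tu r : String) (n : Int) (restA : List String) (restB : List Int)
    (hd : td = "." ++ suffix) (hu : tu = "_" ++ suffix)
    (h0 : 0 < n) (hn : -(PySem.Str.len suffix + 1) = -n)
    (hld : (td.toList.length : Int) = n) (hlu : (tu.toList.length : Int) = n)
    (hr : pvA_role suffix = r)
    (hgd : PySem.Dict.get? pvB_roleByTail td = some r)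
    (hgu : PySem.Dict.get? pvB_roleByTail tu = some r)
    (honly : ∀ p ∈ pvB_pairs, (p.1.toList.length : Int) = n → p.1 = td ∨ p.1 = tu)
    (hrec : pvA_go key restA = pvB_go key restB) :
    pvA_go key (suffix :: restA) = pvB_go key (n :: restB) := by
  by_cases h1 : td.toList <:+ key.toList
  · rw [pvA_hit key suffix restA (Or.inl (by rw [← hd]; exact h1)),
        pvB_hit key n restB td r h0 hld h1 hgd, hn, hr]
  · by_cases h2 : tu.toList <:+ key.toList
    · rw [pvA_hit key suffix restA (Or.inr (by rw [← hu]; exact h2)),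
          pvB_hit key n restB tu r h0 hlu h2 hgu, hn, hr]
    · rw [pvA_skip key suffix restA (by rw [← hd]; exact h1) (by rw [← hu]; exact h2),
          pvB_skip_of_not_suffix key td tu n restB h0 hld hlu h1 h2 honly]
      exact hrec

theorem pv_step2 (key sA sB tdA tuA tdB tuB rA rB : String) (n : Int)
    (restA : List String) (restB : List Int)
    (hdA : tdA = "." ++ sA) (huA : tuA = "_" ++ sA)
    (hdB : tdB = "." ++ sB) (huB : tuB = "_" ++ sB)
    (h0 : 0 < n)
    (hnA : -(PySem.Str.len sA + 1) = -n) (hnB : -(PySem.Str.len sB + 1) = -n)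
    (hldA : (tdA.toList.length : Int) = n) (hluA : (tuA.toList.length : Int) = n)
    (hldB : (tdB.toList.length : Int) = n) (hluB : (tuB.toList.length : Int) = n)
    (hrA : pvA_role sA = rA) (hrB : pvA_role sB = rB)
    (hgdA : PySem.Dict.get? pvB_roleByTail tdA = some rA)
    (hguA : PySem.Dict.get? pvB_roleByTail tuA = some rA)
    (hgdB : PySem.Dict.get? pvB_roleByTail tdB = some rB)
    (hguB : PySem.Dict.get? pvB_roleByTail tuB = some rB)
    (honly : ∀ p ∈ pvB_pairs, (p.1.toList.length : Int) = n →
             p.1 = tdA ∨ p.1 = tuA ∨ p.1 = tdB ∨ p.1 = tuB)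
    (hrec : pvA_go key restA = pvB_go key restB) :
    pvA_go key (sA :: sB :: restA) = pvB_go key (n :: restB) := by
  by_cases h1 : tdA.toList <:+ key.toList
  · rw [pvA_hit key sA (sB :: restA) (Or.inl (by rw [← hdA]; exact h1)),
        pvB_hit key n restB tdA rA h0 hldA h1 hgdA, hnA, hrA]
  · by_cases h2 : tuA.toList <:+ key.toList
    · rw [pvA_hit key sA (sB :: restA) (Or.inr (by rw [← huA]; exact h2)),
          pvB_hit key n restB tuA rA h0 hluA h2 hguA, hnA, hrA]
    · rw [pvA_skip key sA (sB :: restA) (by rw [← hdA]; exact h1) (by rw [← huA]; exact h2)]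
      by_cases h3 : tdB.toList <:+ key.toList
      · rw [pvA_hit key sB restA (Or.inl (by rw [← hdB]; exact h3)),
            pvB_hit key n restB tdB rB h0 hldB h3 hgdB, hnB, hrB]
      · by_cases h4 : tuB.toList <:+ key.toList
        · rw [pvA_hit key sB restA (Or.inr (by rw [← huB]; exact h4)),
              pvB_hit key n restB tuB rB h0 hluB h4 hguB, hnB, hrB]
        · rw [pvA_skip key sB restA (by rw [← hdB]; exact h3) (by rw [← huB]; exact h4)]
          rw [pvB_skip_of_not_suffix4 key tdA tuA tdB tuB n restB h0 hldA hluA hldB hluB h1 h2 h3 h4 honly]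
          exact hrec

-- ===== VERDICT (by name: the statement is the Claim_ definition above) =====
theorem parse_lora_key_spec : Claim_equal_parse_lora_key := by
  intro key _
  unfold Spec_parse_lora_key parse_lora_key parse_lora_key_alt
  refine pv_step key "lora_down.weight" ".lora_down.weight" "_lora_down.weight" "lora_down" 17 _ _
    (by decide) (by decide) (by decide) (by decide) (by decide) (by decide) (by decide)
    (by decide) (by decide) (by decide) ?_
  refine pv_step key "lora_up.weight" ".lora_up.weight" "_lora_up.weight" "lora_up" 15 _ _
    (by decide) (by decide) (by decide) (by decide) (by decide) (by decide) (by decide)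
    (by decide) (by decide) (by decide) ?_
  refine pv_step2 key "lora_A.weight" "lora_B.weight" ".lora_A.weight" "_lora_A.weight"
    ".lora_B.weight" "_lora_B.weight" "lora_down" "lora_up" 14 _ _
    (by decide) (by decide) (by decide) (by decide) (by decide) (by decide) (by decide)
    (by decide) (by decide) (by decide) (by decide) (by decide) (by decide)
    (by decide) (by decide) (by decide) (by decide) (by decide) ?_
  refine pv_step key "alpha" ".alpha" "_alpha" "alpha" 6 _ _
    (by decide) (by decide) (by decide) (by decide) (by decide) (by decide) (by decide)
    (by decide) (by decide) (by decide) ?_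
  refine pv_step key "dora_scale" ".dora_scale" "_dora_scale" "dora_scale" 11 _ _
    (by decide) (by decide) (by decide) (by decide) (by decide) (by decide) (by decide)
    (by decide) (by decide) (by decide) ?_
  refine pv_step key "bias" ".bias" "_bias" "bias" 5 _ _
    (by decide) (by decide) (by decide) (by decide) (by decide) (by decide) (by decide)
    (by decide) (by decide) (by decide) ?_
  rfl
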